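-- pv_equiv track=rewrite | github.com/thaReal/MasterChef | codeforces/round_639/hotel.py | solve
-- ===== SOURCE A (Python) =====
-- def solve(n, a):
-- 	rms = []
-- 	for k in range(n):
-- 		rm =  a[k] + k % n
-- 		rms.append(rm)
--
-- 	if len(set(rms)) == len(rms):
-- 		return 'YES'
-- 	else:
-- 		return 'NO'
-- ===== SOURCE B (Python) =====
-- def _ins(x, s):
--     i = 0
--     while i < len(s) and s[i] < x:
--         i += 1
--     return s[:i] + [x] + s[i:]
--
-- def solve(n, a):
--     s = []
--     for k in range(n):
--         s = _ins(a[k] + k % n, s)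
--     i = 0
--     while i + 1 < len(s):
--         if s[i] == s[i + 1]:
--             return 'NO'
--         i += 1
--     return 'YES'
-- ===== Notes on version B (the rewrite author's own statement) =====
-- stated objective: alternative
-- what changed: B maintains a sorted list by incremental insertion sort and detects a duplicate as two equal adjacent elements, instead of A's build-a-list-then-compare-set-size test.
import Mathlib
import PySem

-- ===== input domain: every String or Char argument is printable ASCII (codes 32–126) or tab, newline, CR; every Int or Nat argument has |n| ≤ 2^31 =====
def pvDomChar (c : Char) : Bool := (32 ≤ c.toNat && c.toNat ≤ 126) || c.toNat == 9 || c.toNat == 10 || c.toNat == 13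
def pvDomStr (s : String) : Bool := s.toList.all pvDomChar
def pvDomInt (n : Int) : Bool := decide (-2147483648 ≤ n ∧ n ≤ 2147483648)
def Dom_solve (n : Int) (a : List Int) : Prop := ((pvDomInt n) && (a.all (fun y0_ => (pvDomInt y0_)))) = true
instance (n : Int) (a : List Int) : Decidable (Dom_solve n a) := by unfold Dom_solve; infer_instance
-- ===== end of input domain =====

-- B keeps the values a[k] + k % n in a sorted list via incremental insertion and reports a
-- duplicate as two equal adjacent elements, instead of A's set-size comparison (no speed claim).

-- ===== PORT A =====
def solve (n : Int) (a : List Int) : String :=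
  let rms := (PySem.List.pyRange 0 n 1).foldl
    (fun acc k => acc ++ [(PySem.List.pyGet? a k).getD 0 + PySem.Int.mod k n]) []
  if (PySem.Set.ofList rms).length == rms.length then "YES" else "NO"

-- ===== PORT B =====
-- _ins in Source B: insert x into the already-sorted list s, keeping it sorted
def insB (x : Int) (s : List Int) : List Int :=
  match s with
  | [] => [x]
  | y :: t => if x ≤ y then x :: y :: t else y :: insB x t

-- the trailing while-loop of Source B: walk adjacent pairs, stop at the first equal one
def scanB (s : List Int) : String :=
  match s with
  | x :: y :: t => if x == y then "NO" else scanB (y :: t)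
  | _ => "YES"

def solve_alt (n : Int) (a : List Int) : String :=
  scanB ((PySem.List.pyRange 0 n 1).foldl
    (fun s k => insB ((PySem.List.pyGet? a k).getD 0 + PySem.Int.mod k n) s) [])

-- ===== PRECONDITION & SPEC =====
-- A indexes a[k] for k in range(n): exclude exactly n > len(a), where A raises IndexError.
def Pre_solve (n : Int) (a : List Int) : Prop := n ≤ (a.length : Int)
instance (n : Int) (a : List Int) : Decidable (Pre_solve n a) := by unfold Pre_solve; infer_instance
def pvWitness_solve : Int × List Int := (3, [1, 5, 2])

def Spec_solve (n : Int) (a : List Int) (out : String) : Prop := out = solve_alt n a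
instance (n : Int) (a : List Int) (out : String) : Decidable (Spec_solve n a out) := by unfold Spec_solve; infer_instance

-- ===== CLAIM (what is proved, stated in full; the proofs are below) =====
def Claim_equal_solve : Prop := ∀ (n : Int) (a : List Int), Dom_solve n a → Pre_solve n a → Spec_solve n a (solve n a)

-- ===== LEMMAS AND PROOFS =====

-- Source B's _ins is Mathlib's orderedInsert
lemma insB_eq_orderedInsert (x : Int) (s : List Int) :
    insB x s = List.orderedInsert (· ≤ ·) x s := by
  induction s with
  | nil => rfl
  | cons y t ih => simp [insB, List.orderedInsert, ih]

-- the insertion fold produces a permutation of acc ++ (values of ks)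
lemma foldl_insB_perm (f : Int → Int) (ks : List Int) (acc : List Int) :
    (ks.foldl (fun s k => insB (f k) s) acc).Perm (acc ++ ks.map f) := by
  induction ks generalizing acc with
  | nil => simp
  | cons k ks ih =>
    simp only [List.foldl_cons, List.map_cons]
    refine (ih (insB (f k) acc)).trans ?_
    refine (((insB_eq_orderedInsert (f k) acc ▸ List.perm_orderedInsert _ (f k) acc).append_right
      (ks.map f)).trans ?_)
    simpa using List.perm_middle.symm

-- the insertion fold keeps the accumulator sorted
lemma foldl_insB_pairwise (f : Int → Int) (ks : List Int) (acc : List Int)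
    (h : acc.Pairwise (· ≤ ·)) :
    (ks.foldl (fun s k => insB (f k) s) acc).Pairwise (· ≤ ·) := by
  induction ks generalizing acc with
  | nil => exact h
  | cons k ks ih =>
    simp only [List.foldl_cons]
    exact ih _ (by rw [insB_eq_orderedInsert]; exact List.Pairwise.orderedInsert _ _ h)

-- on a ≤-sorted list, scanB answers "YES" exactly on duplicate-free lists
lemma scanB_eq (s : List Int) (hs : s.Pairwise (· ≤ ·)) :
    scanB s = if s.Nodup then "YES" else "NO" := by
  induction s with
  | nil => rfl
  | cons x t ih =>
    cases t with
    | nil => rfl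
    | cons y u =>
      have hxy : x ≤ y := (List.pairwise_cons.1 hs).1 y (by simp)
      have ht : (y :: u).Pairwise (· ≤ ·) := (List.pairwise_cons.1 hs).2
      by_cases hxy' : x = y
      · subst hxy'
        simp [scanB, List.nodup_cons]
      · have hne : (x == y) = false := by simp [hxy']
        have hnotmem : x ∉ y :: u := by
          intro hmem
          rcases List.mem_cons.1 hmem with h | h
          · exact hxy' h
          · have : y ≤ x := List.rel_of_pairwise_cons ht h
            have hlt : x < y := lt_of_le_of_ne hxy hxy'
            omega
        simp [scanB, hne, ih ht, List.nodup_cons, hnotmem]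

-- len(set(v)) == len(v) exactly when v has no duplicates
lemma ofList_length_eq_iff (v : List Int) :
    (PySem.Set.ofList v).length = v.length ↔ v.Nodup := by
  constructor
  · intro h
    have hsub : (PySem.Set.ofList v).Subperm v := by
      refine List.subperm_of_subset (PySem.Set.nodup_ofList v) ?_
      intro x hx; exact (PySem.Set.mem_ofList v x).1 hx
    have hp := hsub.perm_of_length_le (le_of_eq h.symm)
    exact hp.nodup (PySem.Set.nodup_ofList v)
  · intro h; exact congrArg List.length (PySem.Set.ofList_eq_self_of_nodup v h)

-- ===== VERDICT (by name: the statement is the Claim_ definition above) =====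
theorem solve_spec : Claim_equal_solve := by
  intro n a _ _
  unfold Spec_solve solve solve_alt
  simp only [PySem.List.foldl_append_singleton_eq_map, List.nil_append]
  set f : Int → Int := fun k => (PySem.List.pyGet? a k).getD 0 + PySem.Int.mod k n with hf
  set v := (PySem.List.pyRange 0 n 1).map f with hv
  set s := (PySem.List.pyRange 0 n 1).foldl (fun s k => insB (f k) s) [] with hs
  have hperm : s.Perm v := by simpa using foldl_insB_perm f (PySem.List.pyRange 0 n 1) []
  have hpair : s.Pairwise (· ≤ ·) := foldl_insB_pairwise f (PySem.List.pyRange 0 n 1) [] (by simp)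
  rw [scanB_eq s hpair]
  by_cases hnd : v.Nodup
  · simp [(ofList_length_eq_iff v).2 hnd, hperm.symm.nodup hnd]
  · have h1 : ((PySem.Set.ofList v).length == v.length) = false := by
      simp only [beq_eq_false_iff_ne, ne_eq]
      exact fun h => hnd ((ofList_length_eq_iff v).1 h)
    have h2 : ¬ s.Nodup := fun h => hnd (hperm.nodup h)
    simp [h1, h2]
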